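-- pv_equiv track=rewrite | github.com/btr-supply/chomp | src/utils/uid.py | find_next_suffix
-- ===== SOURCE A (Python) =====
-- ROMAN_NUMERALS = [
--     "",
--     "I",
--     "II",
--     "III",
--     "IV",
--     "V",
--     "VI",
--     "VII",
--     "VIII",
--     "IX",
--     "X",
--     "XI",
--     "XII",
--     "XIII",
--     "XIV",
--     "XV",
--     "XVI",
--     "XVII",
--     "XVIII",
--     "XIX",
--     "XX",
--     "XXI",
--     "XXII",
--     "XXIII",
--     "XXIV",
--     "XXV",
--     "XXVI",
--     "XXVII",
--     "XXVIII",
--     "XXIX",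
--     "XXX",
-- ]
--
-- def find_next_suffix(existing_names: list[str], base_name: str) -> str:
--   """Find the next available Roman numeral suffix"""
--   if base_name not in existing_names:
--     return base_name
--
--   # Extract existing suffix indices
--   existing_suffixes = []
--   for name in existing_names:
--     if name == base_name:
--       existing_suffixes.append(0)
--     elif name.startswith(f"{base_name}-"):
--       suffix = name[len(base_name) + 1:]
--       if suffix in ROMAN_NUMERALS:
--         existing_suffixes.append(ROMAN_NUMERALS.index(suffix))
--
--   # Find next available suffix
--   next_index = max(existing_suffixes) + 1 if existing_suffixes else 1
--
--   if next_index < len(ROMAN_NUMERALS):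
--     suffix = ROMAN_NUMERALS[next_index]
--     return f"{base_name}-{suffix}" if suffix else base_name
--   else:
--     return f"{base_name}-{next_index}"
-- ===== SOURCE B (Python) =====
-- ROMAN_NUMERALS = [
--     "",
--     "I",
--     "II",
--     "III",
--     "IV",
--     "V",
--     "VI",
--     "VII",
--     "VIII",
--     "IX",
--     "X",
--     "XI",
--     "XII",
--     "XIII",
--     "XIV",
--     "XV",
--     "XVI",
--     "XVII",
--     "XVIII",
--     "XIX",
--     "XX",
--     "XXI",
--     "XXII",
--     "XXIII",
--     "XXIV",
--     "XXV",
--     "XXVI",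
--     "XXVII",
--     "XXVIII",
--     "XXIX",
--     "XXX",
-- ]
--
-- def find_next_suffix(existing_names: list[str], base_name: str) -> str:
--   """Find the next available Roman numeral suffix"""
--   if base_name not in existing_names:
--     return base_name
--   names = set(existing_names)
--   # scan the numeral table back-to-front: the first hit is the largest used index
--   for i in range(len(ROMAN_NUMERALS) - 1, 0, -1):
--     if f"{base_name}-{ROMAN_NUMERALS[i]}" in names:
--       next_index = i + 1
--       if next_index < len(ROMAN_NUMERALS):
--         return f"{base_name}-{ROMAN_NUMERALS[next_index]}"
--       return f"{base_name}-{next_index}"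
--   return f"{base_name}-I"
-- ===== Notes on version B (the rewrite author's own statement) =====
-- stated objective: alternative
-- what changed: Instead of collecting every used suffix index per name and taking max(), B puts the names in a set and scans the 31-entry Roman-numeral table back-to-front, returning at the first (i.e. largest) index whose candidate name is present.
import Mathlib
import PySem

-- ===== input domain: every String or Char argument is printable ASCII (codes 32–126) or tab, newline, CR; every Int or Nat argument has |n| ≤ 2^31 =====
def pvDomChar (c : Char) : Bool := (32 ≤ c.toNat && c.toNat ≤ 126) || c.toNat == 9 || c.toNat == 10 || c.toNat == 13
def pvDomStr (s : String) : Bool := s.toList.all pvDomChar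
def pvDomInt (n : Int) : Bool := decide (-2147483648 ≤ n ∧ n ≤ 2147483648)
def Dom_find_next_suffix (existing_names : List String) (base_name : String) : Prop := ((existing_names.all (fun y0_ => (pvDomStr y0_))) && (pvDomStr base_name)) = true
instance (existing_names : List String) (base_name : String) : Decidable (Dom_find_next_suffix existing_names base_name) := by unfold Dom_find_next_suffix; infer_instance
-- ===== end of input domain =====

/- B replaces A's per-name suffix-collecting pass + max() by one back-to-front scan of the numeral
   table against a set of the names (first hit = largest used index); objective: alternative. -/


-- ===== PORT A =====
def ROMAN_NUMERALS : List String :=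
  ["", "I", "II", "III", "IV", "V", "VI", "VII", "VIII", "IX", "X",
   "XI", "XII", "XIII", "XIV", "XV", "XVI", "XVII", "XVIII", "XIX", "XX",
   "XXI", "XXII", "XXIII", "XXIV", "XXV", "XXVI", "XXVII", "XXVIII", "XXIX", "XXX"]

def find_next_suffix (existing_names : List String) (base_name : String) : String :=
  if ¬ existing_names.contains base_name then base_name
  else
    let existing_suffixes : List Int :=
      existing_names.foldl (fun acc name =>
        if name == base_name then acc ++ [(0 : Int)]
        else if PySem.Str.startswith name (PySem.Str.join "" [base_name, "-"]) then
          let suffix := PySem.Str.slice name (some (PySem.Str.len base_name + 1)) none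
          if ROMAN_NUMERALS.contains suffix then
            acc ++ [(((PySem.List.index? ROMAN_NUMERALS suffix).getD 0 : Nat) : Int)]
          else acc
        else acc) []
    let next_index : Int :=
      if ¬ existing_suffixes.isEmpty then
        ((PySem.List.max? existing_suffixes (fun x => x)).getD 0) + 1
      else 1
    if next_index < (ROMAN_NUMERALS.length : Int) then
      let suffix := PySem.List.pyGetD ROMAN_NUMERALS next_index ""
      if suffix ≠ "" then PySem.Str.join "" [base_name, "-", suffix] else base_name
    else PySem.Str.join "" [base_name, "-", PySem.Int.toStr next_index]

-- ===== PORT B =====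
-- Source B's 'for i in range(len(ROMAN_NUMERALS) - 1, 0, -1)' with early return, as structural
-- recursion on the current index i (0 = loop exhausted)
def fns_altLoop (names : PySem.Set String) (base_name : String) : Nat → String
  | 0 => PySem.Str.join "" [base_name, "-", "I"]
  | i + 1 =>
    if PySem.Set.contains names
        (PySem.Str.join "" [base_name, "-", PySem.List.pyGetD ROMAN_NUMERALS ((i : Int) + 1) ""]) then
      if (i : Int) + 1 + 1 < (ROMAN_NUMERALS.length : Int) then
        PySem.Str.join "" [base_name, "-", PySem.List.pyGetD ROMAN_NUMERALS ((i : Int) + 1 + 1) ""]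
      else
        PySem.Str.join "" [base_name, "-", PySem.Int.toStr ((i : Int) + 1 + 1)]
    else fns_altLoop names base_name i

def find_next_suffix_alt (existing_names : List String) (base_name : String) : String :=
  if ¬ existing_names.contains base_name then base_name
  else fns_altLoop (PySem.Set.ofList existing_names) base_name (ROMAN_NUMERALS.length - 1)

-- ===== PRECONDITION & SPEC =====
def Spec_find_next_suffix (existing_names : List String) (base_name : String) (out : String) : Prop := out = find_next_suffix_alt existing_names base_name
instance (existing_names : List String) (base_name : String) (out : String) : Decidable (Spec_find_next_suffix existing_names base_name out) := by unfold Spec_find_next_suffix; infer_instance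

-- ===== CLAIM (what is proved, stated in full; the proofs are below) =====
def Claim_equal_find_next_suffix : Prop := ∀ (existing_names : List String) (base_name : String), Dom_find_next_suffix existing_names base_name → Spec_find_next_suffix existing_names base_name (find_next_suffix existing_names base_name)

-- ===== LEMMAS AND PROOFS =====

-- the candidate name "{p}-{ROMAN_NUMERALS[i]}"
def fns_cand (p : String) (i : Nat) : String :=
  PySem.Str.join "" [p, "-", ROMAN_NUMERALS.getD i ""]

-- greatest i in 1..n with fns_cand p i among the names (0 if none)
def fns_maxIdx (names : List String) (p : String) : Nat → Nat
  | 0 => 0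
  | i + 1 => if fns_cand p (i + 1) ∈ names then i + 1 else fns_maxIdx names p i

-- the common output shape, as a function of the largest used index m
def fns_output (p : String) (m : Nat) : String :=
  if (m : Int) + 1 < 31 then PySem.Str.join "" [p, "-", ROMAN_NUMERALS.getD (m + 1) ""]
  else PySem.Str.join "" [p, "-", PySem.Int.toStr ((m : Int) + 1)]

-- the per-name contribution of A's collecting loop
def fns_contrib (p : String) (name : String) : List Int :=
  if name == p then [(0 : Int)]
  else if PySem.Str.startswith name (PySem.Str.join "" [p, "-"]) then
    if ROMAN_NUMERALS.contains (PySem.Str.slice name (some (PySem.Str.len p + 1)) none) then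
      [(((PySem.List.index? ROMAN_NUMERALS
          (PySem.Str.slice name (some (PySem.Str.len p + 1)) none)).getD 0 : Nat) : Int)]
    else []
  else []

theorem fns_R_len : ROMAN_NUMERALS.length = 31 := rfl

theorem fns_R_ne_empty : ∀ i : Nat, i < 31 → 1 ≤ i → ROMAN_NUMERALS.getD i "" ≠ "" := by decide

theorem fns_index_getD : ∀ i : Nat, i < 31 →
    PySem.List.index? ROMAN_NUMERALS (ROMAN_NUMERALS.getD i "") = some i := by decide

theorem fns_toList_join3 (a b c : String) :
    (PySem.Str.join "" [a, b, c]).toList = a.toList ++ b.toList ++ c.toList := by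
  rw [PySem.Str.toList_join]
  simp only [List.map_cons, List.map_nil, PySem.Chars.join]
  rw [show ("" : String).toList = [] from rfl]
  simp [List.intercalate]

theorem fns_toList_join2 (a b : String) :
    (PySem.Str.join "" [a, b]).toList = a.toList ++ b.toList := by
  rw [PySem.Str.toList_join]
  simp only [List.map_cons, List.map_nil, PySem.Chars.join]
  rw [show ("" : String).toList = [] from rfl]
  simp [List.intercalate]

theorem fns_slice_toList (p name : String) :
    (PySem.Str.slice name (some (PySem.Str.len p + 1)) none).toList
      = name.toList.drop (p.toList.length + 1) := by
  rw [PySem.Str.toList_slice, PySem.Chars.slice_eq_listSlice, PySem.Str.len_eq,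
      PySem.List.slice_from _ (by positivity : (0 : Int) ≤ (p.toList.length : Int) + 1)]
  congr 1

theorem fns_maxIdx_le (names : List String) (p : String) (n : Nat) : fns_maxIdx names p n ≤ n := by
  induction n with
  | zero => simp [fns_maxIdx]
  | succ k ih => simp only [fns_maxIdx]; split <;> omega

theorem fns_le_maxIdx (names : List String) (p : String) (n i : Nat)
    (h1 : 1 ≤ i) (h2 : i ≤ n) (hm : fns_cand p i ∈ names) : i ≤ fns_maxIdx names p n := by
  induction n with
  | zero => omega
  | succ k ih =>
    simp only [fns_maxIdx]
    split
    · omega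
    · rename_i hne
      by_cases hik : i = k + 1
      · exact absurd (hik ▸ hm) hne
      · exact ih (by omega)

theorem fns_maxIdx_spec (names : List String) (p : String) (n : Nat) :
    fns_maxIdx names p n = 0 ∨ (1 ≤ fns_maxIdx names p n ∧ fns_cand p (fns_maxIdx names p n) ∈ names) := by
  induction n with
  | zero => left; rfl
  | succ k ih =>
    simp only [fns_maxIdx]
    split
    · right; exact ⟨by omega, by assumption⟩
    · exact ih

-- reconstruction: a name that starts with "{p}-" is "{p}-{suffix}" for its sliced suffix
theorem fns_recon (p name : String)
    (h : PySem.Str.startswith name (PySem.Str.join "" [p, "-"]) = true) :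
    name = PySem.Str.join "" [p, "-", PySem.Str.slice name (some (PySem.Str.len p + 1)) none] := by
  rw [PySem.Str.startswith_eq, PySem.Chars.startswith_iff] at h
  obtain ⟨t, ht⟩ := h
  rw [fns_toList_join2] at ht
  rw [← String.toList_inj, fns_toList_join3, fns_slice_toList, ← ht]
  rw [show p.toList.length + 1 = (p.toList ++ ("-" : String).toList).length from by
    rw [List.length_append]; rfl]
  rw [List.drop_left]

-- cand p i is never equal to p (it is strictly longer)
theorem fns_cand_ne (p : String) (i : Nat) : fns_cand p i ≠ p := by
  intro h
  have h2 := congrArg (fun s => s.toList.length) h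
  simp only [fns_cand, fns_toList_join3] at h2
  rw [List.length_append, List.length_append,
    show ("-" : String).toList = ['-'] from rfl] at h2
  simp only [List.length_cons, List.length_nil] at h2
  omega

theorem fns_contrib_cand (p : String) (i : Nat) (h1 : 1 ≤ i) (h2 : i ≤ 30) :
    fns_contrib p (fns_cand p i) = [(i : Int)] := by
  have hne : (fns_cand p i == p) = false := by
    rw [beq_eq_false_iff_ne]
    exact fns_cand_ne p i
  have hsw : PySem.Str.startswith (fns_cand p i) (PySem.Str.join "" [p, "-"]) = true := by
    rw [PySem.Str.startswith_eq, PySem.Chars.startswith_iff, fns_cand, fns_toList_join3,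
      fns_toList_join2]
    exact ⟨(ROMAN_NUMERALS.getD i "").toList, rfl⟩
  have hslice : PySem.Str.slice (fns_cand p i) (some (PySem.Str.len p + 1)) none
      = ROMAN_NUMERALS.getD i "" := by
    rw [← String.toList_inj, fns_slice_toList, fns_cand, fns_toList_join3]
    rw [show p.toList.length + 1 = (p.toList ++ ("-" : String).toList).length from by
      rw [List.length_append]; rfl]
    rw [List.drop_left]
  have hmem : ROMAN_NUMERALS.getD i "" ∈ ROMAN_NUMERALS := by
    rw [List.getD_eq_getElem ROMAN_NUMERALS "" (by rw [fns_R_len]; omega)]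
    exact List.getElem_mem _
  simp only [fns_contrib]
  rw [if_neg (by rw [hne]; exact Bool.false_ne_true), if_pos hsw]
  simp only [hslice]
  rw [if_pos (by simpa using hmem), fns_index_getD i (by omega), Option.getD_some]

theorem fns_contrib_mem (p name : String) (x : Int) (hx : x ∈ fns_contrib p name) :
    x = 0 ∨ ∃ i : Nat, 1 ≤ i ∧ i ≤ 30 ∧ x = (i : Int) ∧ name = fns_cand p i := by
  simp only [fns_contrib] at hx
  split at hx
  · left; simpa using hx
  · split at hx
    · rename_i hsw
      split at hx
      · rename_i hcon
        have hmem : PySem.Str.slice name (some (PySem.Str.len p + 1)) none ∈ ROMAN_NUMERALS := by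
          simpa using hcon
        obtain ⟨k, hk⟩ := Option.isSome_iff_exists.mp
          ((PySem.List.index?_isSome_iff _ _).mpr hmem)
        obtain ⟨hklt, hkeq, -⟩ := PySem.List.getElem_of_index?_eq_some hk
        rw [hk, Option.getD_some] at hx
        have hxval : x = (k : Int) := by simpa using hx
        rcases Nat.eq_zero_or_pos k with hk0 | hk1
        · left; omega
        · right
          refine ⟨k, hk1, by rw [fns_R_len] at hklt; omega, hxval, ?_⟩
          rw [fns_cand, List.getD_eq_getElem ROMAN_NUMERALS "" hklt, hkeq]
          exact fns_recon p name hsw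
      · simp at hx
    · simp at hx

theorem fns_foldA (names : List String) (p : String) (acc : List Int) :
    names.foldl (fun acc name =>
        if name == p then acc ++ [(0 : Int)]
        else if PySem.Str.startswith name (PySem.Str.join "" [p, "-"]) then
          let suffix := PySem.Str.slice name (some (PySem.Str.len p + 1)) none
          if ROMAN_NUMERALS.contains suffix then
            acc ++ [(((PySem.List.index? ROMAN_NUMERALS suffix).getD 0 : Nat) : Int)]
          else acc
        else acc) acc = acc ++ names.flatMap (fns_contrib p) := by
  induction names generalizing acc with
  | nil => simp
  | cons name rest ih =>
    rw [List.foldl_cons, ih, List.flatMap_cons]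
    have hstep : (if name == p then acc ++ [(0 : Int)]
        else if PySem.Str.startswith name (PySem.Str.join "" [p, "-"]) then
          let suffix := PySem.Str.slice name (some (PySem.Str.len p + 1)) none
          if ROMAN_NUMERALS.contains suffix then
            acc ++ [(((PySem.List.index? ROMAN_NUMERALS suffix).getD 0 : Nat) : Int)]
          else acc
        else acc) = acc ++ fns_contrib p name := by
      show (if name == p then acc ++ [(0 : Int)]
        else if PySem.Str.startswith name (PySem.Str.join "" [p, "-"]) then
          if ROMAN_NUMERALS.contains (PySem.Str.slice name (some (PySem.Str.len p + 1)) none) then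
            acc ++ [(((PySem.List.index? ROMAN_NUMERALS
              (PySem.Str.slice name (some (PySem.Str.len p + 1)) none)).getD 0 : Nat) : Int)]
          else acc
        else acc) = acc ++ fns_contrib p name
      simp only [fns_contrib]
      split_ifs <;> simp
    rw [hstep, List.append_assoc]

theorem fns_max_eq (names : List String) (p : String) (hp : p ∈ names) :
    PySem.List.max? (names.flatMap (fns_contrib p)) (fun x => x)
      = some ((fns_maxIdx names p 30 : Nat) : Int) := by
  have h0 : (0 : Int) ∈ names.flatMap (fns_contrib p) :=
    List.mem_flatMap.mpr ⟨p, hp, by simp [fns_contrib]⟩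
  cases hmax : PySem.List.max? (names.flatMap (fns_contrib p)) (fun x => x) with
  | none =>
    rw [PySem.List.max?_eq_none_iff] at hmax
    rw [hmax] at h0
    simp at h0
  | some m =>
    have hmem := PySem.List.max?_mem hmax
    have hismax : ∀ y ∈ names.flatMap (fns_contrib p), y ≤ m := fun y hy =>
      PySem.List.max?_isMax hmax y hy
    have hbound : ∀ y ∈ names.flatMap (fns_contrib p),
        0 ≤ y ∧ y ≤ ((fns_maxIdx names p 30 : Nat) : Int) := by
      intro y hy
      obtain ⟨name, hname, hyc⟩ := List.mem_flatMap.mp hy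
      rcases fns_contrib_mem p name y hyc with h0' | ⟨i, hi1, hi2, hix, hnc⟩
      · exact ⟨le_of_eq h0'.symm, h0' ▸ Int.natCast_nonneg _⟩
      · refine ⟨hix ▸ Int.natCast_nonneg _, ?_⟩
        rw [hix]
        exact_mod_cast fns_le_maxIdx names p 30 i hi1 hi2 (hnc ▸ hname)
    have hle1 : m ≤ ((fns_maxIdx names p 30 : Nat) : Int) := (hbound m hmem).2
    have hle2 : ((fns_maxIdx names p 30 : Nat) : Int) ≤ m := by
      rcases fns_maxIdx_spec names p 30 with hz | ⟨h1, hmemM⟩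
      · rw [hz]
        exact_mod_cast hismax 0 h0
      · exact hismax _ (List.mem_flatMap.mpr ⟨fns_cand p (fns_maxIdx names p 30), hmemM, by
          rw [fns_contrib_cand p _ h1 (fns_maxIdx_le names p 30)]; simp⟩)
    exact congrArg some (le_antisymm hle1 hle2)

theorem fns_altLoop_eq (names : List String) (p : String) (n : Nat) (hn : n ≤ 30) :
    fns_altLoop (PySem.Set.ofList names) p n = fns_output p (fns_maxIdx names p n) := by
  induction n with
  | zero =>
    simp only [fns_altLoop, fns_maxIdx, fns_output]
    rw [if_pos (by norm_num)]
    rw [show ROMAN_NUMERALS.getD (0 + 1) "" = "I" from rfl]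
  | succ k ih =>
    have hcast : ((k : Int) + 1) = (((k + 1 : Nat)) : Int) := by push_cast; ring
    simp only [fns_altLoop, hcast, PySem.List.pyGetD_natCast]
    by_cases hm : fns_cand p (k + 1) ∈ names
    · rw [if_pos (show PySem.Set.contains (PySem.Set.ofList names)
          (PySem.Str.join "" [p, "-", ROMAN_NUMERALS.getD (k + 1) ""]) = true from
          (PySem.Set.contains_iff _ _).mpr ((PySem.Set.mem_ofList _ _).mpr hm))]
      rw [show fns_maxIdx names p (k + 1) = k + 1 from by simp only [fns_maxIdx]; rw [if_pos hm]]
      rw [fns_output, show k + 1 + 1 = k + 2 from rfl]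
      rw [show (((k + 1 : Nat)) : Int) + 1 = (((k + 2 : Nat)) : Int) from by push_cast; ring]
      rw [PySem.List.pyGetD_natCast, fns_R_len]
      norm_num
    · rw [if_neg (show ¬ (PySem.Set.contains (PySem.Set.ofList names)
          (PySem.Str.join "" [p, "-", ROMAN_NUMERALS.getD (k + 1) ""]) = true) from fun hc =>
          hm ((PySem.Set.mem_ofList _ _).mp ((PySem.Set.contains_iff _ _).mp hc)))]
      rw [show fns_maxIdx names p (k + 1) = fns_maxIdx names p k from by
        simp only [fns_maxIdx]; rw [if_neg hm]]
      exact ih (by omega)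

theorem fns_A_eq (names : List String) (p : String) (hp : p ∈ names) :
    find_next_suffix names p = fns_output p (fns_maxIdx names p 30) := by
  unfold find_next_suffix
  rw [if_neg (by simp [hp])]
  simp only [fns_foldA, List.nil_append]
  have h0 : (0 : Int) ∈ names.flatMap (fns_contrib p) :=
    List.mem_flatMap.mpr ⟨p, hp, by simp [fns_contrib]⟩
  rw [if_pos (show ¬ ((names.flatMap (fns_contrib p)).isEmpty = true) from fun hE =>
    List.ne_nil_of_mem h0 (List.isEmpty_iff.mp hE))]
  rw [fns_max_eq names p hp, Option.getD_some]
  have hMle : fns_maxIdx names p 30 ≤ 30 := fns_maxIdx_le names p 30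
  by_cases hlt : fns_maxIdx names p 30 < 30
  · rw [if_pos (show ((fns_maxIdx names p 30 : Nat) : Int) + 1 < (ROMAN_NUMERALS.length : Int) from by
      rw [fns_R_len]; exact_mod_cast (show fns_maxIdx names p 30 + 1 < 31 from by omega))]
    simp only [show ((fns_maxIdx names p 30 : Nat) : Int) + 1
        = (((fns_maxIdx names p 30 + 1 : Nat)) : Int) from by push_cast; ring,
      PySem.List.pyGetD_natCast]
    rw [if_pos (show ¬ (ROMAN_NUMERALS.getD (fns_maxIdx names p 30 + 1) "" = "") from
      fns_R_ne_empty _ (by omega) (by omega))]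
    rw [fns_output, if_pos (show ((fns_maxIdx names p 30 : Nat) : Int) + 1 < 31 from by
      exact_mod_cast (show fns_maxIdx names p 30 + 1 < 31 from by omega))]
  · have h30 : fns_maxIdx names p 30 = 30 := by omega
    rw [h30]
    rw [if_neg (by rw [fns_R_len]; norm_num)]
    rw [fns_output, if_neg (by norm_num)]

theorem fns_B_eq (names : List String) (p : String) (hp : p ∈ names) :
    find_next_suffix_alt names p = fns_output p (fns_maxIdx names p 30) := by
  unfold find_next_suffix_alt
  rw [if_neg (by simp [hp])]
  rw [show ROMAN_NUMERALS.length - 1 = 30 from rfl]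
  exact fns_altLoop_eq names p 30 (by omega)

-- ===== VERDICT (by name: the statement is the Claim_ definition above) =====
theorem find_next_suffix_spec : Claim_equal_find_next_suffix := by
  intro names p _
  unfold Spec_find_next_suffix
  by_cases hp : p ∈ names
  · rw [fns_A_eq names p hp, fns_B_eq names p hp]
  · unfold find_next_suffix find_next_suffix_alt
    rw [if_pos (by simpa using hp), if_pos (by simpa using hp)]
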